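-- pv_equiv track=rewrite | github.com/TDeepanshPandey/Python_Data_Structure_Algorithms | Array/string_compression.py | compress
-- ===== SOURCE A (Python) =====
-- def compress(s):
--     if len(s) == 0:
--         return ''
--     res = []
--     for i in sorted(set(s)):
--         res.append(i)
--         res.append(str(tuple(s).count(i)))
--     return ''.join(res)
-- ===== SOURCE B (Python) =====
-- def compress(s):
--     out = []
--     cur = None
--     n = 0
--     for ch in sorted(s):
--         if ch == cur:
--             n += 1
--         else:
--             if cur is not None:
--                 out.append(cur + str(n))
--             cur, n = ch, 1
--     if cur is not None:
--         out.append(cur + str(n))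
--     return ''.join(out)
-- ===== Notes on version B (the rewrite author's own statement) =====
-- stated objective: alternative
-- what changed: Replaced A's 'build set, sort unique chars, rescan the whole string once per unique char to count it' with 'sort the whole string once and emit runs in a single linear grouping pass'.
import Mathlib
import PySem

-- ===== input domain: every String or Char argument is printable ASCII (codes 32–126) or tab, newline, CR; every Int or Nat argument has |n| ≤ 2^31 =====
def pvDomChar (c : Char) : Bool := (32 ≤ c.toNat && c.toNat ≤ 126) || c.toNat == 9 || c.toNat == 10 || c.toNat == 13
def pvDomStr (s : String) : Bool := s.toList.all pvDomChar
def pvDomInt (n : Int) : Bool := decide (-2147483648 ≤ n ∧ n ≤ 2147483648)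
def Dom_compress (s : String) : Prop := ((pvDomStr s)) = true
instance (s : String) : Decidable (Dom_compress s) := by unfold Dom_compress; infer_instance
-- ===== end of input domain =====

-- B replaces A's per-unique-character rescan of the whole string by one sort of the whole
-- string followed by a single linear run-length grouping pass (objective: alternative).

-- ===== PORT A =====
def compress (s : String) : String :=
  if PySem.Str.len s = 0 then "" else
    PySem.Str.join ""
      ((PySem.List.sorted (PySem.Set.ofList s.toList) (fun x => x) false).foldl
        (fun res i =>
          res ++ [String.ofList [i], PySem.Int.toStr ((PySem.List.count s.toList i : Nat) : Int)])
        [])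

-- ===== PORT B =====
-- single pass over the sorted characters carrying (current run's char `c`, its count `n`)
def runsGo : List Char → Char → Nat → List String
  | [], c, n => [String.ofList [c] ++ PySem.Int.toStr (n : Int)]
  | d :: r, c, n =>
      if d == c then runsGo r c (n + 1)
      else (String.ofList [c] ++ PySem.Int.toStr (n : Int)) :: runsGo r d 1

def runsB : List Char → List String
  | [] => []
  | c :: r => runsGo r c 1

def compress_alt (s : String) : String :=
  PySem.Str.join "" (runsB (PySem.List.sorted s.toList (fun x => x) false))

-- ===== PRECONDITION & SPEC =====
def Spec_compress (s : String) (out : String) : Prop := out = compress_alt s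
instance (s : String) (out : String) : Decidable (Spec_compress s out) := by unfold Spec_compress; infer_instance

-- ===== CLAIM (what is proved, stated in full; the proofs are below) =====
def Claim_equal_compress : Prop := ∀ (s : String), Dom_compress s → Spec_compress s (compress s)

-- ===== LEMMAS AND PROOFS =====

def piece (c : Char) (n : Nat) : String := String.ofList [c] ++ PySem.Int.toStr (n : Int)

-- the first character of each run of the list (recursion parallel to runsGo's)
def headsGo : List Char → Char → List Char
  | [], c => [c]
  | d :: r, c => if d == c then headsGo r c else c :: headsGo r d

def heads : List Char → List Char
  | [] => []
  | c :: r => headsGo r c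

lemma count_cons_self' (r : List Char) (d : Char) :
    PySem.List.count (d :: r) d = PySem.List.count r d + 1 := by
  simp [PySem.List.count]

lemma count_cons_ne (r : List Char) (d e : Char) (h : e ≠ d) :
    PySem.List.count (d :: r) e = PySem.List.count r e := by
  simp [PySem.List.count, Ne.symm h]

lemma headsGo_cons (r : List Char) (c : Char) :
    headsGo r c = c :: (headsGo r c).tail := by
  induction r generalizing c with
  | nil => rfl
  | cons d r2 ih =>
      by_cases h : d = c
      · simp only [headsGo, h, BEq.rfl, if_pos]
        exact ih c
      · simp [headsGo, h]

lemma mem_headsGo (r : List Char) (c e : Char) :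
    e ∈ headsGo r c ↔ e = c ∨ e ∈ r := by
  induction r generalizing c with
  | nil => simp [headsGo]
  | cons d r2 ih =>
      by_cases h : d = c
      · subst h
        simp only [headsGo, BEq.rfl, if_pos, ih, List.mem_cons]
        tauto
      · simp only [headsGo, if_neg (by simp [h] : ¬ (d == c) = true), List.mem_cons, ih]

lemma headsGo_tail_gt (r : List Char) (c : Char)
    (hs : r.Pairwise (· ≤ ·)) (hb : ∀ x ∈ r, c ≤ x) :
    ∀ e ∈ (headsGo r c).tail, c < e := by
  induction r generalizing c with
  | nil => simp [headsGo]
  | cons d r2 ih =>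
      rcases List.pairwise_cons.mp hs with ⟨hd, hs2⟩
      by_cases h : d = c
      · subst h
        simpa [headsGo] using ih d hs2 hd
      · have hcd : c < d := lt_of_le_of_ne (hb d (by simp)) (Ne.symm h)
        intro e he
        simp only [headsGo, if_neg (by simp [h] : ¬ (d == c) = true), List.tail_cons] at he
        rw [headsGo_cons] at he
        rcases List.mem_cons.mp he with rfl | he2
        · exact hcd
        · exact lt_trans hcd (ih d hs2 hd e he2)

lemma headsGo_pairwise (r : List Char) (c : Char)
    (hs : r.Pairwise (· ≤ ·)) (hb : ∀ x ∈ r, c ≤ x) :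
    (headsGo r c).Pairwise (· < ·) := by
  induction r generalizing c with
  | nil => simp [headsGo]
  | cons d r2 ih =>
      rcases List.pairwise_cons.mp hs with ⟨hd, hs2⟩
      by_cases h : d = c
      · subst h
        simpa [headsGo] using ih d hs2 hd
      · have hcd : c < d := lt_of_le_of_ne (hb d (by simp)) (Ne.symm h)
        simp only [headsGo, if_neg (by simp [h] : ¬ (d == c) = true)]
        refine List.pairwise_cons.mpr ⟨?_, ih d hs2 hd⟩
        intro e he
        rw [headsGo_cons] at he
        rcases List.mem_cons.mp he with rfl | he2
        · exact hcd
        · exact lt_trans hcd (headsGo_tail_gt r2 d hs2 hd e he2)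

lemma count_eq_zero_of_lt (r : List Char) (c : Char)
    (hgt : ∀ x ∈ r, c < x) : PySem.List.count r c = 0 := by
  simp only [PySem.List.count]
  exact List.count_eq_zero.mpr (fun hc => lt_irrefl c (hgt c hc))

lemma runsGo_eq (r : List Char) (c : Char) (n : Nat)
    (hs : r.Pairwise (· ≤ ·)) (hb : ∀ x ∈ r, c ≤ x) :
    runsGo r c n = piece c (n + PySem.List.count r c) ::
      (headsGo r c).tail.map (fun d => piece d (PySem.List.count r d)) := by
  induction r generalizing c n with
  | nil => simp [runsGo, headsGo, piece, PySem.List.count]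
  | cons d r2 ih =>
      rcases List.pairwise_cons.mp hs with ⟨hd, hs2⟩
      by_cases h : d = c
      · subst h
        simp only [runsGo, headsGo, BEq.rfl, if_pos]
        rw [ih d (n + 1) hs2 hd]
        congr 1
        · rw [count_cons_self']
          congr 1
          omega
        · apply List.map_congr_left
          intro e he
          have hlt : d < e := headsGo_tail_gt r2 d hs2 hd e he
          rw [count_cons_ne r2 d e (ne_of_gt hlt)]
      · have hcd : c < d := lt_of_le_of_ne (hb d (by simp)) (Ne.symm h)
        have hgt : ∀ x ∈ d :: r2, c < x := by
          intro x hx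
          rcases List.mem_cons.mp hx with rfl | hx2
          · exact hcd
          · exact lt_of_lt_of_le hcd (hd x hx2)
        have hmap : (headsGo r2 d).map (fun e => piece e (PySem.List.count (d :: r2) e)) =
            piece d (1 + PySem.List.count r2 d) ::
              (headsGo r2 d).tail.map (fun e => piece e (PySem.List.count r2 e)) := by
          conv_lhs => rw [headsGo_cons r2 d]
          rw [List.map_cons]
          congr 1
          · rw [count_cons_self']
            congr 1
            omega
          · apply List.map_congr_left
            intro e he
            have hlt : d < e := headsGo_tail_gt r2 d hs2 hd e he
            rw [count_cons_ne r2 d e (ne_of_gt hlt)]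
        simp only [runsGo, headsGo, if_neg (by simp [h] : ¬ (d == c) = true), List.tail_cons]
        rw [ih d 1 hs2 hd, count_eq_zero_of_lt _ _ hgt, hmap]
        congr 1

lemma runsB_eq (t : List Char) (hs : t.Pairwise (· ≤ ·)) :
    runsB t = (heads t).map (fun d => piece d (PySem.List.count t d)) := by
  cases t with
  | nil => rfl
  | cons c r =>
      rcases List.pairwise_cons.mp hs with ⟨hb, hs2⟩
      simp only [runsB, heads]
      rw [runsGo_eq r c 1 hs2 hb, headsGo_cons r c, List.map_cons]
      congr 1
      · rw [count_cons_self']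
        congr 1
        omega
      · apply List.map_congr_left
        intro e he
        have hlt : c < e := headsGo_tail_gt r c hs2 hb e he
        rw [count_cons_ne r c e (ne_of_gt hlt)]

lemma mem_heads (t : List Char) (e : Char) : e ∈ heads t ↔ e ∈ t := by
  cases t with
  | nil => simp [heads]
  | cons c r => simp only [heads, mem_headsGo, List.mem_cons]

lemma heads_pairwise (t : List Char) (hs : t.Pairwise (· ≤ ·)) :
    (heads t).Pairwise (· < ·) := by
  cases t with
  | nil => simp [heads]
  | cons c r =>
      rcases List.pairwise_cons.mp hs with ⟨hb, hs2⟩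
      simpa [heads] using headsGo_pairwise r c hs2 hb

lemma heads_eq_sorted_set (l : List Char) :
    PySem.List.sorted (PySem.Set.ofList l) (fun x => x) false =
      heads (PySem.List.sorted l (fun x => x) false) := by
  have hp : (heads (PySem.List.sorted l (fun x => x) false)).Pairwise (· < ·) :=
    heads_pairwise _ (PySem.List.sorted_pairwise l (fun x => x))
  have hnd : (heads (PySem.List.sorted l (fun x => x) false)).Nodup := hp.imp ne_of_lt
  apply PySem.List.sorted_eq_of_perm_of_pairwise_lt
  · rw [List.perm_ext_iff_of_nodup hnd (PySem.Set.nodup_ofList l)]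
    intro a
    rw [mem_heads, PySem.List.mem_sorted, PySem.Set.mem_ofList]
  · exact hp

lemma count_sorted (l : List Char) (d : Char) :
    PySem.List.count (PySem.List.sorted l (fun x => x) false) d = PySem.List.count l d := by
  simp only [PySem.List.count]
  exact (PySem.List.sorted_perm l (fun x => x) false).count_eq d

lemma chars_join_nil_flatten (xss : List (List Char)) :
    PySem.Chars.join [] xss = xss.flatten := by
  induction xss with
  | nil => simp [PySem.Chars.join_nil]
  | cons p rest ih =>
      cases rest with
      | nil => simp [PySem.Chars.join_singleton]
      | cons q rest2 =>
          rw [PySem.Chars.join_cons_cons, ih]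
          simp

lemma join_flatMap_pairs (m : List Char) (f g : Char → String) :
    PySem.Str.join "" (m.flatMap (fun c => [f c, g c])) =
      PySem.Str.join "" (m.map (fun c => f c ++ g c)) := by
  apply String.ext
  rw [PySem.Str.toList_join, PySem.Str.toList_join]
  have hsep : ("" : String).toList = [] := rfl
  rw [hsep, chars_join_nil_flatten, chars_join_nil_flatten]
  induction m with
  | nil => rfl
  | cons c m2 ih =>
      simp only [List.flatMap_cons, List.map_cons, List.map_append, List.flatten_cons,
        List.map_nil, List.flatten_append]
      rw [ih]
      simp [String.toList_append]

-- ===== VERDICT (by name: the statement is the Claim_ definition above) =====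
theorem compress_spec : Claim_equal_compress := by
  intro s _
  unfold Spec_compress compress compress_alt
  by_cases hnil : s.toList = []
  · rw [if_pos (by rw [PySem.Str.len_eq, hnil]; rfl)]
    rw [hnil]
    rfl
  · rw [if_neg (by rw [PySem.Str.len_eq]; simpa using hnil)]
    rw [PySem.List.foldl_append_eq_flatMap
      (g := fun i => [String.ofList [i], PySem.Int.toStr ((PySem.List.count s.toList i : Nat) : Int)])]
    rw [List.nil_append]
    rw [join_flatMap_pairs _ (fun i => String.ofList [i])
        (fun i => PySem.Int.toStr ((PySem.List.count s.toList i : Nat) : Int))]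
    rw [heads_eq_sorted_set s.toList]
    rw [runsB_eq _ (PySem.List.sorted_pairwise s.toList (fun x => x))]
    simp only [piece, count_sorted]
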